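-- pv_equiv track=rewrite | github.com/fghccv/diff_retrieve_apr | src/code/retrival/defects4j/utils.py | _split_bug_fix
-- ===== SOURCE A (Python) =====
-- def _split_bug_fix(diff):
--     bug = []
--     fix = []
--     for l in diff.split('\n'):
--         if l.startswith('+'):
--             fix.append(l[1:])
--         elif l.startswith('-'):
--             bug.append(l[1:])
--         else:
--             fix.append(l[1:])
--             bug.append(l[1:])
--     return '\n'.join(bug), '\n'.join(fix)
-- ===== SOURCE B (Python) =====
-- def _split_bug_fix(diff):
--     # Single-pass character-level state machine: no split(), no line lists, no join
--     # of lines.  At each line start the marker character picks the destination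
--     # buffers (and is consumed); the rest of the line is streamed char by char.
--     bug = []
--     fix = []
--     nbug = nfix = 0
--     i, n = 0, len(diff)
--     while True:
--         # line start: read the marker character if there is one
--         if i < n and diff[i] != '\n':
--             c = diff[i]
--             i += 1
--             to_bug = c != '+'
--             to_fix = c != '-'
--         else:
--             to_bug = to_fix = True
--         if to_bug:
--             if nbug > 0:
--                 bug.append('\n')
--             nbug += 1
--         if to_fix:
--             if nfix > 0:
--                 fix.append('\n')
--             nfix += 1
--         # stream the rest of the line
--         while i < n and diff[i] != '\n':
--             if to_bug:
--                 bug.append(diff[i])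
--             if to_fix:
--                 fix.append(diff[i])
--             i += 1
--         if i < n:
--             i += 1  # skip the newline, start next line
--         else:
--             break
--     return ''.join(bug), ''.join(fix)
-- ===== Notes on version B (the rewrite author's own statement) =====
-- stated objective: alternative
-- what changed: A splits the diff into a list of lines, classifies each line with a three-way branch into two line lists and joins them; B never materializes lines or line lists: it is a single-pass character-level state machine that reads each line's marker character to choose destination buffers and streams the remaining characters (and separators) directly into the two output buffers.
import Mathlib
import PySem

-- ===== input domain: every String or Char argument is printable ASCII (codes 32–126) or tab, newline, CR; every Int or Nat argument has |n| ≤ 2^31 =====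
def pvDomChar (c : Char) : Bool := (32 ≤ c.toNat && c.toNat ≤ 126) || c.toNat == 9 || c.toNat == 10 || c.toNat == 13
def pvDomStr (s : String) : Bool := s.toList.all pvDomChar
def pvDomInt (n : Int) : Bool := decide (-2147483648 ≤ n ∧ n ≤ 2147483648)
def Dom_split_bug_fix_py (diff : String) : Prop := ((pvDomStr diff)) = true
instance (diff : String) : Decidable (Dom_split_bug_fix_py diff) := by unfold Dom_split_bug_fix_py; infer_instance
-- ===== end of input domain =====

-- B replaces A's split-into-lines / three-way-branch / join-of-line-lists pipeline by a
-- single-pass character-level state machine streaming characters into the two output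
-- buffers (objective: alternative).

-- ===== PORT A =====
-- l[1:] ported as PySem.Chars.slice … (some 1) none; '\n'.join as PySem.Str.join.
-- diff.split('\n') has a nonempty separator, so PySem.Str.split? is always `some`; .getD [] is exact.
def split_bug_fix_py (diff : String) : String × String :=
  let acc := ((PySem.Str.split? diff "\n").getD []).foldl
    (fun (acc : List String × List String) l =>
      if PySem.Str.startswith l "+" then
        (acc.1, acc.2 ++ [String.ofList (PySem.Chars.slice l.toList (some 1) none)])
      else if PySem.Str.startswith l "-" then
        (acc.1 ++ [String.ofList (PySem.Chars.slice l.toList (some 1) none)], acc.2)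
      else
        (acc.1 ++ [String.ofList (PySem.Chars.slice l.toList (some 1) none)],
         acc.2 ++ [String.ofList (PySem.Chars.slice l.toList (some 1) none)]))
    ([], [])
  (PySem.Str.join "\n" acc.1, PySem.Str.join "\n" acc.2)

-- ===== PORT B =====
-- Source B's index loop over diff is ported as structural recursion over the remaining
-- characters: lineHead reads the line's marker character, altCopy is the inner
-- `while` streaming the rest of the line, altGo is the outer `while True` loop.
def lineHead (cs : List Char) : Bool × Bool × List Char :=
  match cs with
  | c :: rest => if c ≠ '\n' then (c ≠ '+', c ≠ '-', rest) else (true, true, c :: rest)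
  | [] => (true, true, [])

def altCopy (cs : List Char) (tb tf : Bool) (bug fix : List Char) :
    List Char × List Char × List Char :=
  match cs with
  | [] => ([], bug, fix)
  | c :: rest =>
    if c = '\n' then (c :: rest, bug, fix)
    else altCopy rest tb tf (if tb then bug ++ [c] else bug) (if tf then fix ++ [c] else fix)

theorem altCopy_fst_length (cs : List Char) (tb tf : Bool) (bug fix : List Char) :
    (altCopy cs tb tf bug fix).1.length ≤ cs.length := by
  induction cs generalizing bug fix with
  | nil => simp [altCopy]
  | cons c rest ih =>
    unfold altCopy
    split_ifs with h
    · simp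
    all_goals exact le_trans (ih _ _) (Nat.le_succ _)

theorem lineHead_snd_length (cs : List Char) : (lineHead cs).2.2.length ≤ cs.length := by
  cases cs with
  | nil => simp [lineHead]
  | cons c rest => by_cases h : c = '\n' <;> simp [lineHead, h]

def altGo (cs : List Char) (nbug nfix : Nat) (bug fix : List Char) : List Char × List Char :=
  let h := lineHead cs
  let tb := h.1
  let tf := h.2.1
  let bug1 := if tb then (if 0 < nbug then bug ++ ['\n'] else bug) else bug
  let nbug1 := if tb then nbug + 1 else nbug
  let fix1 := if tf then (if 0 < nfix then fix ++ ['\n'] else fix) else fix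
  let nfix1 := if tf then nfix + 1 else nfix
  let r := altCopy h.2.2 tb tf bug1 fix1
  match hr : r.1 with
  | [] => (r.2.1, r.2.2)
  | _ :: rest => altGo rest nbug1 nfix1 r.2.1 r.2.2
termination_by cs.length
decreasing_by
  have h1 := altCopy_fst_length (lineHead cs).2.2 (lineHead cs).1 (lineHead cs).2.1 bug1 fix1
  rw [hr] at h1
  have h2 := lineHead_snd_length cs
  simp at h1
  omega

def split_bug_fix_py_alt (diff : String) : String × String :=
  let r := altGo diff.toList 0 0 [] []
  (String.ofList r.1, String.ofList r.2)

-- ===== PRECONDITION & SPEC =====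
def Spec_split_bug_fix_py (diff : String) (out : String × String) : Prop := out = split_bug_fix_py_alt diff
instance (diff : String) (out : String × String) : Decidable (Spec_split_bug_fix_py diff out) := by unfold Spec_split_bug_fix_py; infer_instance

-- ===== CLAIM (what is proved, stated in full; the proofs are below) =====
def Claim_equal_split_bug_fix_py : Prop := ∀ (diff : String), Dom_split_bug_fix_py diff → Spec_split_bug_fix_py diff (split_bug_fix_py diff)

-- ===== LEMMAS AND PROOFS =====

-- The list of lines of cs split at '\n' (reference form both ports are reduced to).
def myLines : List Char → List (List Char)
  | [] => [[]]
  | c :: rest =>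
    if c = '\n' then [] :: myLines rest
    else
      match myLines rest with
      | [] => [[c]]
      | x :: xs => (c :: x) :: xs

theorem myLines_ne_nil (cs : List Char) : myLines cs ≠ [] := by
  cases cs with
  | nil => simp [myLines]
  | cons c rest =>
    unfold myLines
    split_ifs
    · simp
    · cases myLines rest <;> simp

def consHead (p : List Char) : List (List Char) → List (List Char)
  | [] => [p]
  | x :: xs => (p ++ x) :: xs

theorem splitOn_go_spec (fuel : Nat) (cs cur : List Char) (acc : List (List Char))
    (h : cs.length < fuel) :
    PySem.Chars.splitOn.go ['\n'] fuel cs cur acc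
      = acc.reverse ++ consHead cur.reverse (myLines cs) := by
  induction fuel generalizing cs cur acc with
  | zero => omega
  | succ f ih =>
    cases cs with
    | nil => simp [PySem.Chars.splitOn.go, myLines, consHead]
    | cons c rest =>
      rw [PySem.Chars.splitOn.go]
      by_cases hc : c = '\n'
      · subst hc
        have hp : List.isPrefixOf ['\n'] ('\n' :: rest) = true := by
          simp [List.isPrefixOf]
        rw [if_pos hp]
        simp only [List.length_nil, List.length_cons, List.drop_zero, List.drop_succ_cons]
        rw [ih rest [] _ (by simp at h; omega)]
        simp only [myLines, consHead, List.reverse_nil, List.nil_append]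
        cases hml : myLines rest with
        | nil => exact absurd hml (myLines_ne_nil rest)
        | cons x xs => simp
      · have hp : List.isPrefixOf ['\n'] (c :: rest) = false := by
          simp [List.isPrefixOf]; exact fun hh => absurd hh.symm hc
        rw [if_neg (by simp [hp])]
        rw [ih rest (c :: cur) acc (by simp at h; omega)]
        cases hml : myLines rest with
        | nil => exact absurd hml (myLines_ne_nil rest)
        | cons x xs =>
          have hml2 : myLines (c :: rest) = (c :: x) :: xs := by
            unfold myLines; rw [if_neg hc, hml]
          rw [hml2]
          simp [consHead]

theorem splitOn_newline (cs : List Char) :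
    PySem.Chars.splitOn cs ['\n'] = myLines cs := by
  unfold PySem.Chars.splitOn
  rw [splitOn_go_spec _ _ _ _ (by omega)]
  cases hml : myLines cs with
  | nil => exact absurd hml (myLines_ne_nil cs)
  | cons x xs => simp [consHead]

-- A's fold over the lines = filters over the lines.
theorem pv_fold_eq (lines : List String) (b f : List String) :
    lines.foldl
      (fun (acc : List String × List String) l =>
        if PySem.Str.startswith l "+" then
          (acc.1, acc.2 ++ [String.ofList (PySem.Chars.slice l.toList (some 1) none)])
        else if PySem.Str.startswith l "-" then
          (acc.1 ++ [String.ofList (PySem.Chars.slice l.toList (some 1) none)], acc.2)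
        else
          (acc.1 ++ [String.ofList (PySem.Chars.slice l.toList (some 1) none)],
           acc.2 ++ [String.ofList (PySem.Chars.slice l.toList (some 1) none)]))
      (b, f)
    = (b ++ (lines.filter (fun l => !PySem.Str.startswith l "+")).map
          (fun l => String.ofList (PySem.Chars.slice l.toList (some 1) none)),
       f ++ (lines.filter (fun l => !PySem.Str.startswith l "-")).map
          (fun l => String.ofList (PySem.Chars.slice l.toList (some 1) none))) := by
  induction lines generalizing b f with
  | nil => simp
  | cons l rest ih =>
    by_cases hp : PySem.Str.startswith l "+" = true
    · have hm : PySem.Str.startswith l "-" = false := by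
        rw [Bool.eq_false_iff]
        intro h
        rw [PySem.Str.startswith_eq, PySem.Chars.startswith_iff] at hp h
        obtain ⟨t1, ht1⟩ := hp
        obtain ⟨t2, ht2⟩ := h
        rw [← ht1] at ht2
        simp at ht2
      simp only [List.foldl_cons, List.filter_cons, hp, hm, Bool.not_true, Bool.not_false,
        Bool.false_eq_true, if_true, if_false, ite_true, ite_false, List.map_cons, ih,
        List.append_assoc, List.singleton_append]
    · by_cases hm : PySem.Str.startswith l "-" = true
      · simp only [List.foldl_cons, List.filter_cons, hp, hm, Bool.not_true, Bool.not_false,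
          Bool.false_eq_true, if_true, if_false, ite_true, ite_false, List.map_cons, ih,
          Bool.not_eq_true, eq_self_iff_true, List.append_assoc, List.singleton_append,
          Bool.eq_false_iff.mpr hp]
      · simp only [List.foldl_cons, List.filter_cons, Bool.not_true, Bool.not_false,
          Bool.false_eq_true, if_true, if_false, ite_true, ite_false, List.map_cons, ih,
          List.append_assoc, List.singleton_append,
          Bool.eq_false_iff.mpr hp, Bool.eq_false_iff.mpr hm]

-- join continuation: J false = '\n'-join, J true = '\n' before every piece
def J (sep : Bool) : List (List Char) → List Char
  | [] => []
  | x :: xs => (if sep then ['\n'] else []) ++ x ++ J true xs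

theorem J_false_eq_join : ∀ (L : List (List Char)),
    J false L = PySem.Chars.join ['\n'] L
  | [] => by simp [J, PySem.Chars.join_nil]
  | [x] => by simp [J, PySem.Chars.join_singleton]
  | x :: y :: ys => by
    rw [PySem.Chars.join_cons_cons]
    show x ++ J true (y :: ys) = _
    have h1 : J true (y :: ys) = ['\n'] ++ J false (y :: ys) := by simp [J]
    rw [h1, J_false_eq_join (y :: ys)]
    simp

-- the kept-and-trimmed lines of one side
def keepTail (marker : Char) (L : List (List Char)) : List (List Char) :=
  (L.filter (fun t => !(t.head? == some marker))).map List.tail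

theorem altCopy_spec (cs : List Char) (tb tf : Bool) (bug fix : List Char) :
    altCopy cs tb tf bug fix
      = (cs.dropWhile (· ≠ '\n'),
         bug ++ (if tb then cs.takeWhile (· ≠ '\n') else []),
         fix ++ (if tf then cs.takeWhile (· ≠ '\n') else [])) := by
  induction cs generalizing bug fix with
  | nil => simp [altCopy]
  | cons c rest ih =>
    by_cases hc : c = '\n'
    · simp [altCopy, hc]
    · cases tb <;> cases tf <;> simp [altCopy, hc, ih]

theorem myLines_take_drop (cs : List Char) :
    myLines cs
      = match cs.dropWhile (· ≠ '\n') with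
        | [] => [cs.takeWhile (· ≠ '\n')]
        | _ :: r => cs.takeWhile (· ≠ '\n') :: myLines r := by
  induction cs with
  | nil => simp [myLines]
  | cons c rest ih =>
    by_cases hc : c = '\n'
    · simp [myLines, hc]
    · cases hd : rest.dropWhile (· ≠ '\n') with
      | nil =>
        rw [hd] at ih
        have ih' : myLines rest = [rest.takeWhile (· ≠ '\n')] := ih
        have hml2 : myLines (c :: rest) = (c :: rest.takeWhile (· ≠ '\n')) :: [] := by
          unfold myLines; rw [if_neg hc, ih']
        have hd' := hd
        simp only [ne_eq, decide_not] at hd'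
        simp [hml2, hd', List.dropWhile_cons, List.takeWhile_cons, hc]
      | cons d r2 =>
        rw [hd] at ih
        have ih' : myLines rest = rest.takeWhile (· ≠ '\n') :: myLines r2 := ih
        have hml2 : myLines (c :: rest)
            = (c :: rest.takeWhile (· ≠ '\n')) :: myLines r2 := by
          conv_lhs => unfold myLines
          rw [if_neg hc, ih']
        have hd' := hd
        simp only [ne_eq, decide_not] at hd'
        simp [hml2, hd', List.dropWhile_cons, List.takeWhile_cons, hc]

theorem altGo_spec (n : Nat) : ∀ (cs : List Char), cs.length ≤ n →
    ∀ (nbug nfix : Nat) (bug fix : List Char),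
    altGo cs nbug nfix bug fix
      = (bug ++ J (decide (0 < nbug)) (keepTail '+' (myLines cs)),
         fix ++ J (decide (0 < nfix)) (keepTail '-' (myLines cs))) := by
  induction n with
  | zero =>
    intro cs hlen nbug nfix bug fix
    have hcs : cs = [] := List.eq_nil_of_length_eq_zero (Nat.le_zero.mp hlen)
    subst hcs
    rw [altGo]
    by_cases hb : 0 < nbug <;> by_cases hf : 0 < nfix <;>
      simp [lineHead, altCopy, myLines, keepTail, J, hb, hf]
  | succ n ih =>
    intro cs hlen nbug nfix bug fix
    cases cs with
    | nil =>
      rw [altGo]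
      by_cases hb : 0 < nbug <;> by_cases hf : 0 < nfix <;>
        simp [lineHead, altCopy, myLines, keepTail, J, hb, hf]
    | cons c rest =>
      simp only [List.length_cons] at hlen
      by_cases hc : c = '\n'
      · subst hc
        have step : altGo ('\n' :: rest) nbug nfix bug fix
            = altGo rest (nbug + 1) (nfix + 1)
                (if 0 < nbug then bug ++ ['\n'] else bug)
                (if 0 < nfix then fix ++ ['\n'] else fix) := by
          rw [altGo]; simp only [lineHead]; rfl
        rw [step, ih rest (by omega)]
        have hml : myLines ('\n' :: rest) = [] :: myLines rest := by simp [myLines]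
        rw [hml]
        by_cases hb : 0 < nbug <;> by_cases hf : 0 < nfix <;>
          simp [keepTail, J, hb, hf]
      · rw [altGo]
        have hL : lineHead (c :: rest) = (decide (c ≠ '+'), decide (c ≠ '-'), rest) := by
          simp [lineHead, hc]
        simp only [hL, altCopy_spec]
        have hd' : rest.dropWhile (fun x => !decide (x = '\n'))
            = rest.dropWhile (· ≠ '\n') := by simp only [ne_eq, decide_not]
        cases hd : rest.dropWhile (· ≠ '\n') with
        | nil =>
          have hml : myLines (c :: rest) = [c :: rest.takeWhile (· ≠ '\n')] := by
            rw [myLines_take_drop]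
            simp [List.dropWhile_cons, List.takeWhile_cons, hc, hd, hd'.trans hd]
          rw [hml]
          split
          · by_cases hp : c = '+' <;> by_cases hm : c = '-' <;>
              by_cases hb : 0 < nbug <;> by_cases hf : 0 < nfix <;>
              simp [keepTail, J, hp, hm, hb, hf]
          · rename_i head rest1 hr
            rw [hL, altCopy_spec] at hr
            simp only [hd] at hr
            simp at hr
        | cons d r2 =>
          have hml : myLines (c :: rest)
              = (c :: rest.takeWhile (· ≠ '\n')) :: myLines r2 := by
            rw [myLines_take_drop]
            simp [List.dropWhile_cons, List.takeWhile_cons, hc, hd, hd'.trans hd]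
          rw [hml]
          split
          · rename_i hr
            rw [hL, altCopy_spec] at hr
            simp only [hd] at hr
            simp at hr
          · rename_i head rest1 hr
            rw [hL, altCopy_spec] at hr
            simp only [hd] at hr
            injection hr with hh ht
            subst hh ht
            have hlen2 : r2.length ≤ n := by
              have h1 := List.length_dropWhile_le (fun x => decide (x ≠ '\n')) rest
              rw [hd] at h1
              simp at h1
              omega
            rw [ih r2 hlen2]
            by_cases hp : c = '+' <;> by_cases hm : c = '-' <;>
              by_cases hb : 0 < nbug <;> by_cases hf : 0 < nfix <;>
              simp [keepTail, J, hp, hm, hb, hf]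

-- ===== VERDICT (by name: the statement is the Claim_ definition above) =====
-- bridge: A's per-line predicate / transform, expressed on the raw char lines
theorem startswith_single (t : List Char) (m : Char) :
    PySem.Chars.startswith t [m] = (t.head? == some m) := by
  cases t with
  | nil => simp [PySem.Chars.startswith]
  | cons c r =>
    simp [PySem.Chars.startswith, List.isPrefixOf]
    exact eq_comm

theorem slice_one_tail (t : List Char) :
    PySem.List.slice t (some 1) none = t.tail := by
  rw [PySem.List.slice_from (xs := t) (a := 1) (by norm_num)]
  simp [List.drop_one]

theorem lines_eq (diff : String) :
    (PySem.Str.split? diff "\n").getD [] = (myLines diff.toList).map String.ofList := by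
  unfold PySem.Str.split?
  have ht : "\n".toList = ['\n'] := by decide
  rw [ht]
  unfold PySem.Chars.split?
  simp [splitOn_newline]

theorem mapfix (m : Char) (L : List (List Char)) :
    List.map String.toList
      (((L.map String.ofList).filter
          (fun l => !PySem.Str.startswith l (String.ofList [m]))).map
        (fun l => String.ofList (PySem.Chars.slice l.toList (some 1) none)))
      = keepTail m L := by
  induction L with
  | nil => simp [keepTail]
  | cons t R ih =>
    by_cases h : t.head? = some m <;>
      [skip; skip] <;>
      (simp [keepTail, startswith_single, slice_one_tail, h]
       simpa [keepTail, startswith_single, slice_one_tail] using ih)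

theorem side_eq (diff : String) (m : Char) :
    PySem.Str.join "\n"
      ((((myLines diff.toList).map String.ofList).filter
          (fun l => !PySem.Str.startswith l (String.ofList [m]))).map
        (fun l => String.ofList (PySem.Chars.slice l.toList (some 1) none)))
      = String.ofList (J false (keepTail m (myLines diff.toList))) := by
  rw [J_false_eq_join]
  unfold PySem.Str.join
  have ht : "\n".toList = ['\n'] := by decide
  rw [ht, mapfix]

theorem split_bug_fix_py_spec : Claim_equal_split_bug_fix_py := by
  intro diff _
  unfold Spec_split_bug_fix_py split_bug_fix_py split_bug_fix_py_alt
  simp only [lines_eq, pv_fold_eq, List.nil_append,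
    altGo_spec (diff.toList.length) diff.toList (le_refl _) 0 0 [] []]
  have hplus : ("+" : String) = String.ofList ['+'] := by decide
  have hminus : ("-" : String) = String.ofList ['-'] := by decide
  rw [hplus, hminus, side_eq diff '+', side_eq diff '-']
  simp
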